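-- pv_equiv track=rewrite | github.com/isc-projects/kea | src/lib/python/isc/cc/data.py | split_identifier_list_indices
-- ===== SOURCE A (Python) =====
-- class DataTypeError(Exception):
--     """Raised if there is an attempt to set an element that is of a
--        different type than the type specified in the specification."""
--     pass
--
-- def _concat_identifier(id_parts):
--     """Concatenates the given identifier parts into a string,
--        delimited with the '/' character.
--     """
--     return '/'.join(id_parts)
--
-- def split_identifier(identifier):
--     """Splits the given identifier into a list of identifier parts,
--        as delimited by the '/' character.
--        Raises a DataTypeError if identifier is not a string."""
--     if type(identifier) != str:
--         raise DataTypeError("identifier is not a string")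
--     id_parts = identifier.split('/')
--     id_parts[:] = (value for value in id_parts if value != "")
--     return id_parts
--
-- def split_identifier_list_indices(identifier):
--     """Finds list indexes in the given identifier, which are of the
--        format [integer].
--        Identifier must be a string.
--        This will only give the list index for the last 'part' of the
--        given identifier (as delimited by the '/' sign).
--        Raises a DataTypeError if the identifier is not a string,
--        or if the format is bad.
--        Returns a tuple, where the first element is the string part of
--        the identifier, and the second element is a list of (nested) list
--        indices.
--        Examples:
--        'a/b/c' will return ('a/b/c', None)
--        'a/b/c[1]' will return ('a/b/c', [1])
--        'a/b/c[1][2][3]' will return ('a/b/c', [1, 2, 3])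
--        'a[0]/b[1]/c[2]' will return ('a[0]/b[1]/c', [2])
--     """
--     if type(identifier) != str:
--         raise DataTypeError("identifier in "
--                             "split_identifier_list_indices() "
--                             "not a string: " + str(identifier))
--
--     # We only work on the final 'part' of the identifier
--     id_parts = split_identifier(identifier)
--     id_str = id_parts[-1]
--
--     i = id_str.find('[')
--     if i < 0:
--         if id_str.find(']') >= 0:
--             raise DataTypeError("Bad format in identifier (] but no [): " + str(identifier))
--         return identifier, None
--
--     # keep the non-index part of that to replace later
--     id = id_str[:i]
--     indices = []
--     while i >= 0:
--         e = id_str.find(']')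
--         if e < i + 1:
--             raise DataTypeError("Bad format in identifier (] before [): " + str(identifier))
--         try:
--             indices.append(int(id_str[i+1:e]))
--         except ValueError:
--             raise DataTypeError("List index in " + identifier + " not an integer")
--         id_str = id_str[e + 1:]
--         i = id_str.find('[')
--         if i > 0:
--             raise DataTypeError("Bad format in identifier ([ within []): " + str(identifier))
--     if id.find(']') >= 0 or len(id_str) > 0:
--         raise DataTypeError("Bad format in identifier (extra ]): " + str(identifier))
--
--     # we replace the final part of the original identifier with
--     # the stripped string
--     id_parts[-1] = id
--     id = _concat_identifier(id_parts)
--     return id, indices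
-- ===== SOURCE B (Python) =====
-- class DataTypeError(Exception):
--     pass
--
-- def _concat_identifier(id_parts):
--     return '/'.join(id_parts)
--
-- def split_identifier(identifier):
--     if type(identifier) != str:
--         raise DataTypeError("identifier is not a string")
--     id_parts = identifier.split('/')
--     id_parts[:] = (value for value in id_parts if value != "")
--     return id_parts
--
-- def split_identifier_list_indices(identifier):
--     if type(identifier) != str:
--         raise DataTypeError("identifier in split_identifier_list_indices() "
--                             "not a string: " + str(identifier))
--     id_parts = split_identifier(identifier)
--     id_str = id_parts[-1]
--     # Cut the last part at every ']' in one pass instead of scanning with find().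
--     chunks = id_str.split(']')
--     if len(chunks) == 1:
--         # no ']' at all; reject a stray '['
--         if '[' in id_str:
--             raise DataTypeError("Bad format in identifier (no ]): " + identifier)
--         return identifier, None
--     if chunks[-1] != '':
--         raise DataTypeError("Bad format in identifier (text after ]): " + identifier)
--     first, sep, tok = chunks[0].partition('[')
--     if sep == '':
--         raise DataTypeError("Bad format in identifier (] before [): " + identifier)
--     toks = [tok]
--     for chunk in chunks[1:-1]:
--         if not chunk.startswith('[') or '[' in chunk[1:]:
--             raise DataTypeError("Bad format in identifier ([ within []): " + identifier)
--         toks.append(chunk[1:])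
--     try:
--         indices = [int(t) for t in toks]
--     except ValueError:
--         raise DataTypeError("List index in " + identifier + " not an integer")
--     id_parts[-1] = first
--     return _concat_identifier(id_parts), indices
-- ===== Notes on version B (the rewrite author's own statement) =====
-- stated objective: alternative
-- what changed: B splits the final '/'-part once at every ']' and validates/parses the resulting chunks in a single pass, instead of A's while-loop that repeatedly re-scans with find('[')/find(']') and re-slices the remaining string.
-- outside the precondition, e.g. on split_identifier_list_indices('/'): A raises IndexError, B raises IndexError; on split_identifier_list_indices(']'): A raises DataTypeError, B raises DataTypeError; on split_identifier_list_indices('['): A raises DataTypeError, B raises DataTypeError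
import Mathlib
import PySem

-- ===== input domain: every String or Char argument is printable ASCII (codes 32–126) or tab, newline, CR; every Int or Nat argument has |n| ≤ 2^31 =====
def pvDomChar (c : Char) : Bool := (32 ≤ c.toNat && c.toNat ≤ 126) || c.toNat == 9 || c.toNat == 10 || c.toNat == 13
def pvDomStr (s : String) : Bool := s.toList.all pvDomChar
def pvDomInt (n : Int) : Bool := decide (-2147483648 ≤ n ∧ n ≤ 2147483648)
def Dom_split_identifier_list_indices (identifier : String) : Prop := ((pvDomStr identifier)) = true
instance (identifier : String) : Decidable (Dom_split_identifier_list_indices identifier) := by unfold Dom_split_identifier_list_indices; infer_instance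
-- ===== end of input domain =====

-- B replaces A's repeated find(']')/slice scanning loop by one split(']') pass plus per-chunk
-- validation (alternative decomposition; same return value, proved on Pre_ below).

-- ===== PORT A =====

-- '/'.join(id_parts)
def pvConcat (parts : List (List Char)) : List Char := PySem.Chars.join ['/'] parts

-- split_identifier: identifier.split('/') with the empty parts filtered out
def pvSplitIdentifier (identifier : String) : List (List Char) :=
  (PySem.Chars.splitOn identifier.toList ['/']).filter (fun v => !(v == []))

-- the 'while i >= 0' loop of A; none = the DataTypeError raised inside the loop
def pvALoop (id_str : List Char) (indices : List Int) (i : Int) : Option (List Int × List Char) :=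
  if hi : 0 ≤ i then
    let e := PySem.Chars.find id_str [']']
    if he : e < i + 1 then none
    else
      match PySem.Int.ofChars? (PySem.List.slice id_str (some (i+1)) (some e)) with
      | none => none
      | some v =>
        let id_str' := PySem.List.slice id_str (some (e+1)) none
        let i' := PySem.Chars.find id_str' ['[']
        if 0 < i' then none
        else pvALoop id_str' (indices ++ [v]) i'
  else some (indices, id_str)
termination_by id_str.length
decreasing_by
  have hfind := PySem.Chars.find_le_length id_str [']']
  have he0 : (0:Int) ≤ PySem.Chars.find id_str [']'] := by omega
  have hinf := (PySem.Chars.find_spec he0).1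
  have hne : List.drop (PySem.Chars.find id_str [']']).toNat id_str ≠ [] := by
    intro hd; rw [hd] at hinf; simp at hinf
  have hlt : (PySem.Chars.find id_str [']']).toNat < id_str.length := by
    by_contra hge
    exact hne (List.drop_eq_nil_of_le (by omega))
  simp only [PySem.List.slice, PySem.List.clampIdx]
  split_ifs <;> simp <;> omega

-- none = a raise of DataTypeError (or the IndexError of id_parts[-1] when all parts are empty);
-- those inputs are outside Pre_
def split_identifier_list_indices (identifier : String) : String × Option (List Int) :=
  let id_parts := pvSplitIdentifier identifier
  match PySem.List.pyGet? id_parts (-1) with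
  | none => ("", none)
  | some id_str =>
    let i := PySem.Chars.find id_str ['[']
    if i < 0 then
      if 0 ≤ PySem.Chars.find id_str [']'] then ("", none)
      else (identifier, none)
    else
      let id := PySem.List.slice id_str none (some i)
      match pvALoop id_str [] i with
      | none => ("", none)
      | some (indices, rest) =>
        if 0 ≤ PySem.Chars.find id [']'] ∨ 0 < rest.length then ("", none)
        else
          (String.ofList (pvConcat (PySem.List.pySetD id_parts (-1) id)), some indices)

-- ===== PORT B =====

-- hand port of str.partition('[') for the single-character separator (exact: splits at the
-- FIRST '['; the Bool is 'separator found')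
def pvPartitionLB (s : List Char) : List Char × Bool × List Char :=
  let pre := s.takeWhile (fun c => !(c == '['))
  if pre.length = s.length then (s, false, [])
  else (pre, true, s.drop (pre.length + 1))

-- the 'for chunk in chunks[1:-1]' loop of B; none = raise
def pvBChunkLoop (chunks : List (List Char)) (toks : List (List Char)) : Option (List (List Char)) :=
  match chunks with
  | [] => some toks
  | chunk :: restc =>
    if !(PySem.Chars.startswith chunk ['[']) || PySem.Chars.isIn ['['] (PySem.List.slice chunk (some 1) none) then none
    else pvBChunkLoop restc (toks ++ [PySem.List.slice chunk (some 1) none])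

-- none = a raise of DataTypeError (or the IndexError of id_parts[-1]); outside Pre_
def split_identifier_list_indices_alt (identifier : String) : String × Option (List Int) :=
  let id_parts := pvSplitIdentifier identifier
  match PySem.List.pyGet? id_parts (-1) with
  | none => ("", none)
  | some id_str =>
    let chunks := PySem.Chars.splitOn id_str [']']
    if chunks.length = 1 then
      if PySem.Chars.isIn ['['] id_str then ("", none)
      else (identifier, none)
    else if !(PySem.List.pyGetD chunks (-1) [] == []) then ("", none)
    else
      match PySem.List.pyGet? chunks 0 with
      | none => ("", none)
      | some c0 =>
        match pvPartitionLB c0 with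
        | (_, false, _) => ("", none)
        | (first, true, tok) =>
          match pvBChunkLoop (PySem.List.slice chunks (some 1) (some (-1))) [tok] with
          | none => ("", none)
          | some toks =>
            match toks.mapM PySem.Int.ofChars? with
            | none => ("", none)
            | some indices =>
              (String.ofList (pvConcat (PySem.List.pySetD id_parts (-1) first)), some indices)

-- ===== PRECONDITION & SPEC =====

-- reference shape of Python's split for a single-character separator (kernel-friendly,
-- structural; proved equal to PySem.Chars.splitOn below)
def sRef (c : Char) : List Char → List Char → List (List Char)
  | [], cur => [cur.reverse]
  | x :: xs, cur => if x == c then cur.reverse :: sRef c xs [] else sRef c xs (x :: cur)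

-- grammar of a well-formed bracket-group tail: tok ']' ( '[' tok ']' )* where every tok is an
-- int literal (acc holds the reversed chars of the current token)
def pvGoodGroups : List Char → List Char → Bool
  | [], _ => false
  | c :: rest, acc =>
    if c == ']' then
      ((PySem.Int.ofChars? acc.reverse).isSome && !(acc.reverse.contains '[')) &&
      (match rest with
       | [] => true
       | c' :: r' => c' == '[' && pvGoodGroups r' [])
    else pvGoodGroups rest (c :: acc)

-- the final '/'-part either has no brackets at all, or is base ++ '[' ++ groups with a
-- bracket-free base
def pvGoodTail (last : List Char) : Bool :=
  if last.contains '[' then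
    !((last.takeWhile (fun c => !(c == '['))).contains ']') &&
    pvGoodGroups ((last.dropWhile (fun c => !(c == '['))).drop 1) []
  else !(last.contains ']')

-- Pre_ = exactly the inputs on which A returns normally: at least one nonempty '/'-part
-- (otherwise id_parts[-1] raises IndexError) and a well-formed final part (otherwise the
-- DataTypeError raises); no input on which A returns a value is excluded
def Pre_split_identifier_list_indices (identifier : String) : Prop :=
  let parts := (sRef '/' identifier.toList []).filter (fun v => !(v == []))
  parts ≠ [] ∧ pvGoodTail (parts.getLastD []) = true
instance (identifier : String) : Decidable (Pre_split_identifier_list_indices identifier) := by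
  unfold Pre_split_identifier_list_indices; infer_instance

def pvWitness_split_identifier_list_indices : String := "a[1]"

def Spec_split_identifier_list_indices (identifier : String) (out : String × Option (List Int)) : Prop := out = split_identifier_list_indices_alt identifier
instance (identifier : String) (out : String × Option (List Int)) : Decidable (Spec_split_identifier_list_indices identifier out) := by unfold Spec_split_identifier_list_indices; infer_instance

-- ===== CLAIM (what is proved, stated in full; the proofs are below) =====
def Claim_equal_split_identifier_list_indices : Prop := ∀ (identifier : String), Dom_split_identifier_list_indices identifier → Pre_split_identifier_list_indices identifier → Spec_split_identifier_list_indices identifier (split_identifier_list_indices identifier)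

-- ===== LEMMAS AND PROOFS =====

-- the token list of a well-formed tail (proof-side companion of pvGoodGroups)
def gToks : List Char → List Char → List (List Char)
  | [], acc => [acc.reverse]
  | c :: rest, acc =>
    if c == ']' then
      acc.reverse :: (match rest with
        | [] => []
        | c' :: r' => if c' == '[' then gToks r' [] else [])
    else gToks rest (c :: acc)

-- the integer list A and B both return on a well-formed tail
def gInts (r : List Char) : List Int :=
  (gToks r []).map (fun t => (PySem.Int.ofChars? t).getD 0)

theorem dropWhile_head_false {p : Char → Bool} {l : List Char} {x : Char} {xs : List Char}
    (h : l.dropWhile p = x :: xs) : p x = false := by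
  induction l with
  | nil => simp at h
  | cons a t ih =>
    by_cases ha : p a
    · rw [List.dropWhile_cons_of_pos ha] at h; exact ih h
    · rw [List.dropWhile_cons_of_neg ha] at h
      cases h; simpa using ha

theorem goodGroups_nil (acc : List Char) : pvGoodGroups [] acc = false := rfl

theorem goodGroups_sq_nil (acc : List Char) : pvGoodGroups [']'] acc =
    (((PySem.Int.ofChars? acc.reverse).isSome && !(acc.reverse.contains '[')) && true) := rfl

theorem goodGroups_sq_cons (c' : Char) (r' acc : List Char) : pvGoodGroups (']' :: c' :: r') acc =
    (((PySem.Int.ofChars? acc.reverse).isSome && !(acc.reverse.contains '[')) &&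
      (c' == '[' && pvGoodGroups r' [])) := rfl

theorem goodGroups_cons_ne {c : Char} (rest acc : List Char) (h : (c == ']') = false) :
    pvGoodGroups (c :: rest) acc = pvGoodGroups rest (c :: acc) := by
  conv_lhs => rw [pvGoodGroups.eq_def]
  simp [h]

theorem gToks_sq_nil (acc : List Char) : gToks (']' :: []) acc = [acc.reverse] := rfl

theorem gToks_sq_cons_lb (r' acc : List Char) : gToks (']' :: '[' :: r') acc =
    acc.reverse :: gToks r' [] := by
  conv_lhs => rw [gToks.eq_def]
  simp

theorem gToks_cons_ne {c : Char} (rest acc : List Char) (h : (c == ']') = false) :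
    gToks (c :: rest) acc = gToks rest (c :: acc) := by
  conv_lhs => rw [gToks.eq_def]
  simp [h]

-- one unfolding of a well-formed group list
theorem good_decomp : ∀ (r acc : List Char), pvGoodGroups r acc = true →
    ∃ tok : List Char, tok = r.takeWhile (fun c => !(c == ']')) ∧
      PySem.Int.ofChars? (acc.reverse ++ tok) ≠ none ∧
      (acc.reverse ++ tok).contains '[' = false ∧
      ((r = tok ++ [']'] ∧ gToks r acc = [acc.reverse ++ tok]) ∨
       (∃ r', r = tok ++ ']' :: '[' :: r' ∧ pvGoodGroups r' [] = true ∧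
          gToks r acc = (acc.reverse ++ tok) :: gToks r' [])) := by
  intro r
  induction r with
  | nil => intro acc h; rw [goodGroups_nil] at h; simp at h
  | cons c rest ih =>
    intro acc h
    by_cases hc : c = ']'
    · subst hc
      cases rest with
      | nil =>
        rw [goodGroups_sq_nil] at h
        simp only [Bool.and_true] at h
        rcases Bool.and_eq_true_iff.mp h with ⟨h2, h3⟩
        refine ⟨[], by simp [List.takeWhile_cons], ?_, ?_, ?_⟩
        · simpa using Option.isSome_iff_ne_none.mp h2
        · simpa using h3
        · left; exact ⟨by simp, by rw [gToks_sq_nil]; simp⟩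
      | cons c' r' =>
        rw [goodGroups_sq_cons] at h
        rcases Bool.and_eq_true_iff.mp h with ⟨h1, h4⟩
        rcases Bool.and_eq_true_iff.mp h1 with ⟨h2, h3⟩
        rcases Bool.and_eq_true_iff.mp h4 with ⟨h5, h6⟩
        have hc' : c' = '[' := by simpa using h5
        subst hc'
        refine ⟨[], by simp [List.takeWhile_cons], ?_, ?_, ?_⟩
        · simpa using Option.isSome_iff_ne_none.mp h2
        · simpa using h3
        · right
          exact ⟨r', by simp, h6, by rw [gToks_sq_cons_lb]; simp⟩
    · have hcb : (c == ']') = false := by simpa using hc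
      rw [goodGroups_cons_ne rest acc hcb] at h
      obtain ⟨tok', htw, hsome, hcont, hcase⟩ := ih (c :: acc) h
      refine ⟨c :: tok', ?_, ?_, ?_, ?_⟩
      · simp [List.takeWhile_cons, hcb, htw]
      · simpa [List.append_assoc] using hsome
      · simpa [List.append_assoc] using hcont
      · have hgt : gToks (c :: rest) acc = gToks rest (c :: acc) :=
          gToks_cons_ne rest acc hcb
        rcases hcase with ⟨hr, hg⟩ | ⟨r', hr, hgood', hg⟩
        · left
          constructor
          · simp [hr]
          · rw [hgt, hg]; simp
        · right
          exact ⟨r', by simp [hr], hgood', by rw [hgt, hg]; simp⟩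

theorem splitOn_go_eq (c : Char) : ∀ (fuel : Nat) (l cur : List Char) (acc : List (List Char)), l.length ≤ fuel →
    PySem.Chars.splitOn.go [c] fuel l cur acc = acc.reverse ++ sRef c l cur := by
  intro fuel
  induction fuel with
  | zero =>
    intro l cur acc hl
    have : l = [] := List.eq_nil_of_length_eq_zero (by omega)
    subst this
    rw [PySem.Chars.splitOn.go.eq_1]
    simp [sRef]
  | succ n ih =>
    intro l cur acc hl
    cases l with
    | nil => rw [PySem.Chars.splitOn.go.eq_2 _ _ _ _ (by omega)]; simp [sRef]
    | cons x xs =>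
      rw [PySem.Chars.splitOn.go.eq_3]
      by_cases hxc : x = c
      · subst hxc
        have hp : [x].isPrefixOf (x :: xs) = true := by simp [List.isPrefixOf]
        rw [if_pos hp]
        simp only [List.length_singleton, List.drop_succ_cons, List.drop_zero]
        rw [ih xs [] (cur.reverse :: acc) (by simpa using Nat.le_of_succ_le_succ hl)]
        simp [sRef]
      · have hp : [c].isPrefixOf (x :: xs) = false := by
          simp [List.isPrefixOf]
          exact fun h => absurd h.symm hxc
        rw [if_neg (by simp [hp])]
        rw [ih xs (x :: cur) acc (by simpa using Nat.le_of_succ_le_succ hl)]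
        simp [sRef, hxc]

theorem splitOn_singleton (c : Char) (l : List Char) :
    PySem.Chars.splitOn l [c] = sRef c l [] := by
  unfold PySem.Chars.splitOn
  rw [splitOn_go_eq c (l.length + 1) l [] [] (by omega)]
  simp

theorem sRef_not_mem {c : Char} {l : List Char} (h : c ∉ l) (cur : List Char) :
    sRef c l cur = [cur.reverse ++ l] := by
  induction l generalizing cur with
  | nil => simp [sRef]
  | cons x xs ih =>
    have hx : ¬ (x == c) = true := by
      simp; intro hxc; exact h (by simp [hxc])
    simp only [sRef, if_neg hx]
    rw [ih (fun hm => h (List.mem_cons_of_mem _ hm)) (x :: cur)]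
    simp

theorem sRef_append {c : Char} {xs : List Char} (h : c ∉ xs) (ys cur : List Char) :
    sRef c (xs ++ c :: ys) cur = (cur.reverse ++ xs) :: sRef c ys [] := by
  induction xs generalizing cur with
  | nil => simp [sRef]
  | cons x t ih =>
    have hx : ¬ (x == c) = true := by
      simp; intro hxc; exact h (by simp [hxc])
    simp only [List.cons_append, sRef, if_neg hx]
    rw [ih (fun hm => h (List.mem_cons_of_mem _ hm)) (x :: cur)]
    simp

theorem singleton_prefix_iff {c : Char} {l : List Char} : [c] <+: l ↔ l.head? = some c := by
  cases l with
  | nil => simp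
  | cons a t => simp [List.cons_prefix_cons, eq_comm]

theorem find_singleton_not_mem {c : Char} {l : List Char} (h : c ∉ l) :
    PySem.Chars.find l [c] = -1 := by
  rw [PySem.Chars.find_eq_neg_one_iff]
  rw [List.singleton_infix_iff]
  exact h

theorem find_singleton_append {c : Char} {xs : List Char} (ys : List Char) (h : c ∉ xs) :
    PySem.Chars.find (xs ++ c :: ys) [c] = xs.length := by
  have hinf : [c] <:+: (xs ++ c :: ys) := by
    rw [List.singleton_infix_iff]; simp
  have h0 : 0 ≤ PySem.Chars.find (xs ++ c :: ys) [c] := (PySem.Chars.find_nonneg_iff _ _).mpr hinf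
  obtain ⟨hpre, hmin⟩ := PySem.Chars.find_spec h0
  set j := (PySem.Chars.find (xs ++ c :: ys) [c]).toNat with hj
  have hgj : (xs ++ c :: ys)[j]? = some c := by
    have := singleton_prefix_iff.mp hpre
    rwa [List.head?_drop] at this
  have hjx : j = xs.length := by
    rcases Nat.lt_trichotomy j xs.length with hlt | heq | hgt
    · exfalso
      rw [List.getElem?_append_left hlt] at hgj
      exact h (List.mem_of_getElem? hgj)
    · exact heq
    · exfalso
      apply hmin xs.length hgt
      rw [List.drop_append_of_le_length (le_refl _)]
      simp [singleton_prefix_iff]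
  omega

theorem takeWhile_append_of {p : Char → Bool} {xs : List Char} {a : Char}
    (h : ∀ x ∈ xs, p x = true) (ha : p a = false) (ys : List Char) :
    (xs ++ a :: ys).takeWhile p = xs := by
  induction xs with
  | nil => simp [List.takeWhile_cons, ha]
  | cons x t ih =>
    have hx := h x (by simp)
    simp [List.takeWhile_cons, hx, ih (fun y hy => h y (by simp [hy]))]

-- A's loop on a well-formed tail
theorem aLoop_good : ∀ (N : Nat) (r : List Char), r.length ≤ N → ∀ (pre : List Char) (acc : List Int),
    pvGoodGroups r [] = true → ('[' ∉ pre) → (']' ∉ pre) →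
    pvALoop (pre ++ '[' :: r) acc (pre.length : Int) = some (acc ++ gInts r, []) := by
  intro N
  induction N with
  | zero =>
    intro r hr pre acc hgood _ _
    have : r = [] := List.eq_nil_of_length_eq_zero (by omega)
    subst this
    rw [goodGroups_nil] at hgood; simp at hgood
  | succ n ih =>
    intro r hr pre acc hgood hpre1 hpre2
    obtain ⟨tok, htw, hsome, hcont, hcase⟩ := good_decomp r [] hgood
    simp only [List.reverse_nil, List.nil_append] at hsome hcont hcase
    obtain ⟨v, hv⟩ := Option.ne_none_iff_exists'.mp hsome
    have htok : ']' ∉ tok := by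
      intro hm
      rw [htw] at hm
      have := List.mem_takeWhile_imp hm
      simp at this
    -- the common first part of the loop body
    have hL : ∀ X : List Char, pre ++ '[' :: (tok ++ ']' :: X) = (pre ++ '[' :: tok) ++ ']' :: X := by
      intro X; simp
    have hfind : ∀ X : List Char,
        PySem.Chars.find ((pre ++ '[' :: tok) ++ ']' :: X) [']'] = ((pre.length + tok.length + 1 : Nat) : Int) := by
      intro X
      rw [find_singleton_append X (by simp [hpre2, htok])]
      simp
      omega
    have hslice1 : ∀ X : List Char,
        PySem.List.slice ((pre ++ '[' :: tok) ++ ']' :: X)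
          (some ((pre.length : Int) + 1)) (some ((pre.length + tok.length + 1 : Nat) : Int)) = tok := by
      intro X
      rw [show ((pre.length : Int) + 1) = ((pre.length + 1 : Nat) : Int) by push_cast; ring]
      rw [PySem.List.slice_natCast]
      rw [show (pre ++ '[' :: tok) ++ ']' :: X = (pre ++ ['[']) ++ (tok ++ ']' :: X) by simp]
      rw [show pre.length + 1 = (pre ++ ['[']).length by simp]
      rw [List.drop_left]
      rw [show pre.length + tok.length + 1 - (pre ++ ['[']).length = tok.length by simp]
      rw [show tok ++ ']' :: X = tok ++ (']' :: X) from rfl, List.take_left]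
    have hslice2 : ∀ X : List Char,
        PySem.List.slice ((pre ++ '[' :: tok) ++ ']' :: X)
          (some (((pre.length + tok.length + 1 : Nat) : Int) + 1)) none = X := by
      intro X
      rw [show (pre ++ '[' :: tok) ++ ']' :: X = ((pre ++ '[' :: tok) ++ [']']) ++ X by simp]
      simp only [PySem.List.slice, PySem.List.clampIdx]
      rw [if_neg (by push_cast; omega)]
      rw [show (((pre.length + tok.length + 1 : Nat) : Int) + 1).toNat = ((pre ++ '[' :: tok) ++ [']']).length by simp; omega]
      rw [min_eq_left (by simp)]
      rw [List.drop_left]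
      rw [show (((pre ++ '[' :: tok) ++ [']']) ++ X).length - ((pre ++ '[' :: tok) ++ [']']).length = X.length by simp; omega]
      exact List.take_length
    rcases hcase with ⟨hr', hg⟩ | ⟨r', hr', hgood', hg⟩
    · subst hr'
      rw [show pre ++ '[' :: (tok ++ [']']) = (pre ++ '[' :: tok) ++ ']' :: [] by simp]
      rw [pvALoop.eq_def]
      rw [dif_pos (show (0:Int) ≤ (pre.length : Int) by positivity)]
      simp only [hfind []]
      rw [dif_neg (show ¬ (((pre.length + tok.length + 1 : Nat) : Int) < (pre.length : Int) + 1) by push_cast; omega)]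
      simp only [hslice1 [], hv, hslice2 []]
      rw [find_singleton_not_mem (show '[' ∉ ([] : List Char) by simp)]
      rw [if_neg (by omega)]
      rw [pvALoop.eq_def]
      rw [dif_neg (by omega)]
      simp [gInts, hg, hv]
    · subst hr'
      have hlen : r'.length ≤ n := by
        have h2 := hr; simp only [List.length_append, List.length_cons] at h2; omega
      rw [show pre ++ '[' :: (tok ++ ']' :: '[' :: r') = (pre ++ '[' :: tok) ++ ']' :: ('[' :: r') by simp]
      rw [pvALoop.eq_def]
      rw [dif_pos (show (0:Int) ≤ (pre.length : Int) by positivity)]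
      simp only [hfind ('[' :: r')]
      rw [dif_neg (show ¬ (((pre.length + tok.length + 1 : Nat) : Int) < (pre.length : Int) + 1) by push_cast; omega)]
      simp only [hslice1 ('[' :: r'), hv, hslice2 ('[' :: r')]
      rw [show PySem.Chars.find ('[' :: r') ['['] = (0 : Int) by
        simpa using find_singleton_append r' (c := '[') List.not_mem_nil]
      rw [if_neg (by simp)]
      have := ih r' hlen [] (acc ++ [v]) hgood' (by simp) (by simp)
      simp only [List.nil_append, List.length_nil, Nat.cast_zero] at this
      rw [this]
      simp [gInts, hg, hv]

-- B's split(']') on a well-formed tail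
theorem sRef_good : ∀ (N : Nat) (r : List Char), r.length ≤ N → ∀ (pre : List Char),
    pvGoodGroups r [] = true → (']' ∉ pre) →
    sRef ']' (pre ++ '[' :: r) [] =
      (pre ++ '[' :: (gToks r []).headD []) ::
        (((gToks r []).drop 1).map (fun t => '[' :: t) ++ [[]]) := by
  intro N
  induction N with
  | zero =>
    intro r hr pre hgood hpre
    have : r = [] := List.eq_nil_of_length_eq_zero (by omega)
    subst this
    rw [goodGroups_nil] at hgood; simp at hgood
  | succ n ih =>
    intro r hr pre hgood hpre
    obtain ⟨tok, htw, hsome, hcont, hcase⟩ := good_decomp r [] hgood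
    simp only [List.reverse_nil, List.nil_append] at hsome hcont hcase
    have htok : ']' ∉ tok := by
      intro hm
      rw [htw] at hm
      have := List.mem_takeWhile_imp hm
      simp at this
    rcases hcase with ⟨hr', hg⟩ | ⟨r', hr', hgood', hg⟩
    · subst hr'
      have hsplit : pre ++ '[' :: (tok ++ [']']) = (pre ++ '[' :: tok) ++ ']' :: [] := by simp
      rw [hsplit, sRef_append (by simp [hpre, htok]) [] [], hg]
      simp [sRef]
    · subst hr'
      have hsplit : pre ++ '[' :: (tok ++ ']' :: '[' :: r') = (pre ++ '[' :: tok) ++ ']' :: ('[' :: r') := by simp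
      rw [hsplit, sRef_append (by simp [hpre, htok]) ('[' :: r') []]
      have hlen : r'.length ≤ n := by
        have h2 := hr; simp only [List.length_append, List.length_cons] at h2; omega
      have := ih r' hlen [] hgood' (by simp)
      simp only [List.nil_append] at this
      rw [this, hg]
      obtain ⟨tok2, _, _, _, hcase2⟩ := good_decomp r' [] hgood'
      simp only [List.reverse_nil, List.nil_append] at hcase2
      rcases hcase2 with ⟨_, hg2⟩ | ⟨r'', _, _, hg2⟩ <;> simp [hg2]

theorem splitOn_good (N : Nat) (r : List Char) (hr : r.length ≤ N) (pre : List Char)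
    (hgood : pvGoodGroups r [] = true) (hpre : ']' ∉ pre) :
    PySem.Chars.splitOn (pre ++ '[' :: r) [']'] =
      (pre ++ '[' :: (gToks r []).headD []) ::
        (((gToks r []).drop 1).map (fun t => '[' :: t) ++ [[]]) := by
  rw [splitOn_singleton]
  exact sRef_good N r hr pre hgood hpre

-- the tokens of a well-formed tail are bracket-free int literals
theorem toks_good : ∀ (N : Nat) (r : List Char), r.length ≤ N → pvGoodGroups r [] = true →
    (∀ t ∈ gToks r [], t.contains '[' = false) ∧
    (gToks r []).mapM PySem.Int.ofChars? = some (gInts r) := by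
  intro N
  induction N with
  | zero =>
    intro r hr h
    have : r = [] := List.eq_nil_of_length_eq_zero (by omega)
    subst this
    rw [goodGroups_nil] at h; simp at h
  | succ n ih =>
    intro r hr h
    obtain ⟨tok, htw, hsome, hcont, hcase⟩ := good_decomp r [] h
    simp only [List.reverse_nil, List.nil_append] at hsome hcont hcase
    obtain ⟨v, hv⟩ := Option.ne_none_iff_exists'.mp hsome
    rcases hcase with ⟨hr', hg⟩ | ⟨r', hr', hgood', hg⟩
    · constructor
      · intro t ht; rw [hg] at ht; simp at ht; subst ht; exact hcont
      · rw [hg]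
        simp [gInts, hg, List.mapM_cons, hv]
    · have hlen : r'.length ≤ n := by
        have : r.length = tok.length + 2 + r'.length := by
          rw [hr']; simp; omega
        omega
      obtain ⟨ih1, ih2⟩ := ih r' hlen hgood'
      constructor
      · intro t ht
        rw [hg] at ht
        rcases List.mem_cons.mp ht with h1 | h2
        · subst h1; exact hcont
        · exact ih1 t h2
      · rw [hg, List.mapM_cons, hv, ih2]
        simp [gInts, hg, hv]

theorem bChunkLoop_good : ∀ (ts toks : List (List Char)),
    (∀ t ∈ ts, t.contains '[' = false) →
    pvBChunkLoop (ts.map (fun t => '[' :: t)) toks = some (toks ++ ts) := by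
  intro ts
  induction ts with
  | nil => intro toks _; simp [pvBChunkLoop]
  | cons t rest ih =>
    intro toks h
    have hsw : PySem.Chars.startswith ('[' :: t) ['['] = true := by
      simp [PySem.Chars.startswith, List.isPrefixOf]
    have hsl : PySem.List.slice ('[' :: t) (some 1) none = t := by
      simp [PySem.List.slice, PySem.List.clampIdx]
    have hni : PySem.Chars.isIn ['['] t = false := by
      rw [PySem.Chars.isIn_eq_false_iff, List.singleton_infix_iff]
      intro hm
      have := h t (by simp)
      simp [List.contains_iff_mem] at this
      exact this hm
    simp only [List.map_cons, pvBChunkLoop, hsw, hsl, hni]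
    simp only [Bool.not_true, Bool.false_or, Bool.or_false, if_neg (Bool.false_ne_true)]
    rw [ih (toks ++ [t]) (fun u hu => h u (by simp [hu]))]
    simp

theorem slice_one_neg_one {α : Type} (x y : α) (l : List α) :
    PySem.List.slice (x :: (l ++ [y])) (some 1) (some (-1)) = l := by
  simp only [PySem.List.slice, PySem.List.clampIdx]
  norm_num
  rw [if_neg (show ¬((l.length : Int) + 1 < 0) from by omega)]
  rw [show l.length + 1 - 1 = l.length from by omega]
  simpa using List.take_left l [y]

-- ===== VERDICT (by name: the statement is the Claim_ definition above) =====
theorem split_identifier_list_indices_spec : Claim_equal_split_identifier_list_indices := by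
  intro identifier _hdom hpre
  unfold Spec_split_identifier_list_indices
  obtain ⟨hne, htail⟩ := hpre
  set ps := (sRef '/' identifier.toList []).filter (fun v => !(v == [])) with hps
  have hsplitid : pvSplitIdentifier identifier = ps := by
    unfold pvSplitIdentifier
    rw [splitOn_singleton]
  obtain ⟨last, hlastq⟩ : ∃ y, ps.getLast? = some y :=
    Option.isSome_iff_exists.mp (List.getLast?_isSome.mpr hne)
  have hlastd : ps.getLastD [] = last := by
    rw [List.getLastD_eq_getLast?, hlastq]; rfl
  rw [hlastd] at htail
  have hget : PySem.List.pyGet? ps (-1) = some last := by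
    rw [PySem.List.pyGet?_neg_one, hlastq]
  unfold pvGoodTail at htail
  cases hc : last.contains '[' with
  | false =>
    rw [hc] at htail
    simp only [Bool.false_eq_true, if_false, Bool.not_eq_true'] at htail
    have hbm : '[' ∉ last := by simpa using hc
    have hrm : ']' ∉ last := by simpa using htail
    have hfl : PySem.Chars.find last ['['] = -1 := find_singleton_not_mem hbm
    have hfr : PySem.Chars.find last [']'] = -1 := find_singleton_not_mem hrm
    have hsp : PySem.Chars.splitOn last [']'] = [last] := by
      rw [splitOn_singleton, sRef_not_mem hrm]; simp
    unfold split_identifier_list_indices split_identifier_list_indices_alt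
    rw [hsplitid]
    simp only [hget, hfl, hfr, hsp]
    norm_num
    simp [PySem.Chars.isIn, hfl]
  | true =>
    rw [hc] at htail
    simp only [if_true, Bool.and_eq_true, Bool.not_eq_true'] at htail
    obtain ⟨htail1, htail2⟩ := htail
    -- decompose last = pre ++ '[' :: r
    have hdwne : last.dropWhile (fun c => !(c == '[')) ≠ [] := by
      intro hd
      have hmem : '[' ∈ last := by simpa using hc
      conv at hmem => rw [← List.takeWhile_append_dropWhile (p := fun c => !(c == '[')) (l := last)]
      rw [hd, List.append_nil] at hmem
      have := List.mem_takeWhile_imp hmem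
      simp at this
    obtain ⟨c0, r, hdw⟩ : ∃ c0 r, last.dropWhile (fun c => !(c == '[')) = c0 :: r := by
      cases hd : last.dropWhile (fun c => !(c == '[')) with
      | nil => exact absurd hd hdwne
      | cons a b => exact ⟨a, b, rfl⟩
    have hc0 : c0 = '[' := by
      have := dropWhile_head_false hdw
      simpa using this
    subst hc0
    set pre := last.takeWhile (fun c => !(c == '[')) with hpredef
    have hlast_eq : last = pre ++ '[' :: r := by
      conv_lhs => rw [← List.takeWhile_append_dropWhile (p := fun c => !(c == '[')) (l := last)]
      rw [hdw]
    have hGood : pvGoodGroups r [] = true := by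
      rw [hdw] at htail2
      simpa using htail2
    have hpre1 : '[' ∉ pre := by
      intro hm
      have := List.mem_takeWhile_imp hm
      simp at this
    have hpre2 : ']' ∉ pre := by simpa using htail1
    -- shape of the token list
    obtain ⟨tok, htw, hsomeTok, hcontTok, hcaseTok⟩ := good_decomp r [] hGood
    simp only [List.reverse_nil, List.nil_append] at hsomeTok hcontTok hcaseTok
    have hgshape : ∃ ts, gToks r [] = tok :: ts := by
      rcases hcaseTok with ⟨_, hg⟩ | ⟨r', _, _, hg⟩
      · exact ⟨[], hg⟩
      · exact ⟨gToks r' [], hg⟩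
    obtain ⟨ts, hgts⟩ := hgshape
    obtain ⟨hcontAll, hmapM⟩ := toks_good r.length r (le_refl _) hGood
    -- A-side facts
    have hfind0 : PySem.Chars.find last ['['] = (pre.length : Int) := by
      rw [hlast_eq]; exact find_singleton_append r hpre1
    have hidslice : PySem.List.slice last none (some (pre.length : Int)) = pre := by
      rw [hlast_eq, PySem.List.slice_to_natCast, List.take_left]
    have hloop : pvALoop last [] (pre.length : Int) = some (gInts r, []) := by
      rw [hlast_eq]
      simpa using aLoop_good r.length r (le_refl _) pre [] hGood hpre1 hpre2
    have hfpre : PySem.Chars.find pre [']'] = -1 := find_singleton_not_mem hpre2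
    -- B-side facts
    have hchunks : PySem.Chars.splitOn last [']'] =
        (pre ++ '[' :: tok) :: (ts.map (fun t => '[' :: t) ++ [[]]) := by
      rw [hlast_eq, splitOn_good r.length r (le_refl _) pre hGood hpre2, hgts]
      simp
    have hpart : pvPartitionLB (pre ++ '[' :: tok) = (pre, true, tok) := by
      have htake : (pre ++ '[' :: tok).takeWhile (fun c => !(c == '[')) = pre :=
        takeWhile_append_of (fun x hx => by
          simpa using (show x ≠ '[' from fun h => hpre1 (h ▸ hx))) (by simp) tok
      have hdrop : (pre ++ '[' :: tok).drop (pre.length + 1) = tok := by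
        rw [show pre ++ '[' :: tok = (pre ++ ['[']) ++ tok by simp,
            show pre.length + 1 = (pre ++ ['[']).length by simp, List.drop_left]
      unfold pvPartitionLB
      rw [htake]
      rw [if_neg (by simp)]
      rw [hdrop]
    have hbloop : pvBChunkLoop (ts.map (fun t => '[' :: t)) [tok] = some (tok :: ts) := by
      rw [bChunkLoop_good ts [tok] (fun t ht => hcontAll t (by rw [hgts]; exact List.mem_cons_of_mem _ ht))]
      rfl
    have hmapM' : (tok :: ts).mapM PySem.Int.ofChars? = some (gInts r) := by
      rw [← hgts]; exact hmapM
    -- assemble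
    unfold split_identifier_list_indices split_identifier_list_indices_alt
    rw [hsplitid]
    simp only [hget, hfind0, hidslice, hloop, hfpre, hchunks]
    rw [if_neg (show ¬ ((pre.length : Int) < 0) by omega)]
    rw [if_neg (show ¬ ((0:Int) ≤ -1 ∨ 0 < ([] : List Char).length) by simp)]
    rw [if_neg (show ¬ ((pre ++ '[' :: tok) :: (ts.map (fun t => '[' :: t) ++ [[]])).length = 1 by simp)]
    rw [show ((pre ++ '[' :: tok) :: (ts.map (fun t => '[' :: t) ++ [[]])) =
        (((pre ++ '[' :: tok) :: ts.map (fun t => '[' :: t)) ++ [[]]) by simp]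
    rw [PySem.List.pyGetD_neg_one_append_singleton]
    simp only [beq_self_eq_true, Bool.not_true, Bool.false_eq_true, if_false]
    rw [show (((pre ++ '[' :: tok) :: ts.map (fun t => '[' :: t)) ++ [[]]) =
        ((pre ++ '[' :: tok) :: (ts.map (fun t => '[' :: t) ++ [[]])) by simp]
    rw [PySem.List.pyGet?_zero_cons]
    simp only [hpart]
    rw [slice_one_neg_one]
    simp only [hbloop, hmapM']
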